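-- pv_equiv track=rewrite | github.com/Dat19022001/baipy | chanlenguyento.py | vitri
-- ===== SOURCE A (Python) =====
-- def vitri(n):
--     s = str(n);
--     for i in range(0,len(s) - 2,2):
--         if int(s[i]) % 2 !=0:
--             return False;
--     for i in range(1,len(s)-2,2):
--         if int(s[i]) % 2 == 0:
--             return False;
--     return True;
-- ===== SOURCE B (Python) =====
-- def vitri(n):
--     s = str(n)
--     for i in range(len(s) - 2):
--         if int(s[i]) % 2 != i % 2:
--             return False
--     return True
-- ===== Notes on version B (the rewrite author's own statement) =====
-- stated objective: simpler
-- what changed: B replaces A's two sequential stride-2 scans (even indices must hold even digits, odd indices odd digits) with one single pass over i in range(len(s)-2) checking that digit parity equals index parity.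
import Mathlib
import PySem

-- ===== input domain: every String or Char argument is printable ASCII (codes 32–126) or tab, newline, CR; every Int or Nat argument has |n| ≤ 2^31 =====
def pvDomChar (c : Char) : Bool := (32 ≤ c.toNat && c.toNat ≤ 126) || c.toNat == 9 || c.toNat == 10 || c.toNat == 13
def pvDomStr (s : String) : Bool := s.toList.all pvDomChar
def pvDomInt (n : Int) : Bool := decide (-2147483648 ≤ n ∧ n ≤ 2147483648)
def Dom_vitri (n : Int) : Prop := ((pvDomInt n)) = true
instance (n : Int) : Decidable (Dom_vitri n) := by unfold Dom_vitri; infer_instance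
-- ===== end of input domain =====

-- B merges A's two stride-2 scans into one pass comparing digit parity with index parity (objective: simpler).

-- ===== PORT A =====
-- int(s[i]) for a decimal-digit character; exact on Pre_ (n ≥ -9 ⇒ str(n) is all digits,
-- and every index read lies in range, so pyGetD's default is never used).
def pvDigit (s : List Char) (i : Int) : Int :=
  ((PySem.List.pyGetD s i '0').toNat : Int) - 48

def vitri (n : Int) : Bool :=
  let s := PySem.Int.toChars n
  -- first loop: for i in range(0, len(s)-2, 2): if int(s[i]) % 2 != 0: return False
  if (PySem.List.pyRange 0 ((s.length : Int) - 2) 2).any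
      (fun i => PySem.Int.mod (pvDigit s i) 2 != 0) then false
  -- second loop: for i in range(1, len(s)-2, 2): if int(s[i]) % 2 == 0: return False
  else if (PySem.List.pyRange 1 ((s.length : Int) - 2) 2).any
      (fun i => PySem.Int.mod (pvDigit s i) 2 == 0) then false
  else true

-- ===== PORT B =====
-- single loop with early return False on the first parity mismatch
def vitriAltLoop (s : List Char) : List Int → Bool
  | [] => true
  | i :: rest =>
      if PySem.Int.mod (pvDigit s i) 2 != PySem.Int.mod i 2 then false
      else vitriAltLoop s rest

def vitri_alt (n : Int) : Bool :=
  let s := PySem.Int.toChars n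
  vitriAltLoop s (PySem.List.pyRange 0 ((s.length : Int) - 2) 1)

-- ===== PRECONDITION & SPEC =====
-- Pre_ excludes n ≤ -10: there str(n) has length ≥ 3 and A's first loop calls int('-'),
-- which raises ValueError (B raises identically; nothing is claimed there).
def Pre_vitri (n : Int) : Prop := -9 ≤ n
instance (n : Int) : Decidable (Pre_vitri n) := by unfold Pre_vitri; infer_instance
def pvWitness_vitri : Int := (246)

def Spec_vitri (n : Int) (out : Bool) : Prop := out = vitri_alt n
instance (n : Int) (out : Bool) : Decidable (Spec_vitri n out) := by unfold Spec_vitri; infer_instance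

-- ===== CLAIM (what is proved, stated in full; the proofs are below) =====
def Claim_equal_vitri : Prop := ∀ (n : Int), Dom_vitri n → Pre_vitri n → Spec_vitri n (vitri n)

-- ===== LEMMAS AND PROOFS =====

-- B's loop is the conjunction of its per-index checks
theorem vitriAltLoop_eq_all (s : List Char) (l : List Int) :
    vitriAltLoop s l = l.all (fun i => PySem.Int.mod (pvDigit s i) 2 == PySem.Int.mod i 2) := by
  induction l with
  | nil => rfl
  | cons i rest ih =>
      rw [List.all_cons, ← ih]
      show (if (PySem.Int.mod (pvDigit s i) 2 != PySem.Int.mod i 2) = true then false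
            else vitriAltLoop s rest) = _
      cases hab : (PySem.Int.mod (pvDigit s i) 2 == PySem.Int.mod i 2)
      · have hc : (PySem.Int.mod (pvDigit s i) 2 != PySem.Int.mod i 2) = true := by
          rw [bne, hab]; rfl
        rw [if_pos hc]
        exact (Bool.false_and _).symm
      · have hc : (PySem.Int.mod (pvDigit s i) 2 != PySem.Int.mod i 2) = false := by
          rw [bne, hab]; rfl
        rw [if_neg (by rw [hc]; simp)]
        exact (Bool.true_and _).symm

theorem mod_two_of_even {i : Int} (h : 2 ∣ i) : PySem.Int.mod i 2 = 0 := by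
  rw [PySem.Int.mod_eq_emod_of_pos two_pos]
  omega

theorem mod_two_of_odd {i : Int} (h : 2 ∣ i - 1) : PySem.Int.mod i 2 = 1 := by
  rw [PySem.Int.mod_eq_emod_of_pos two_pos]
  omega

theorem vitri_key (s : List Char) (m : Int) :
    (if (PySem.List.pyRange 0 m 2).any (fun i => PySem.Int.mod (pvDigit s i) 2 != 0) then false
     else if (PySem.List.pyRange 1 m 2).any (fun i => PySem.Int.mod (pvDigit s i) 2 == 0) then false
     else true)
    = (PySem.List.pyRange 0 m 1).all (fun i => PySem.Int.mod (pvDigit s i) 2 == PySem.Int.mod i 2) := by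
  by_cases h1 : (PySem.List.pyRange 0 m 2).any
      (fun i => PySem.Int.mod (pvDigit s i) 2 != 0) = true
  · -- A returns false from the first loop: some even index fails
    simp only [h1, if_true]
    obtain ⟨i, hmem, hp⟩ := List.any_eq_true.mp h1
    rw [PySem.List.mem_pyRange_iff_of_pos two_pos] at hmem
    symm
    refine List.all_eq_false.mpr ⟨i, ?_, ?_⟩
    · rw [PySem.List.mem_pyRange_one]; omega
    · have he : PySem.Int.mod i 2 = 0 := mod_two_of_even (by omega)
      simp only [he]
      simpa using hp
  · by_cases h2 : (PySem.List.pyRange 1 m 2).any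
        (fun i => PySem.Int.mod (pvDigit s i) 2 == 0) = true
    · -- A returns false from the second loop: some odd index fails
      simp only [h1, h2, if_true, if_false, Bool.false_eq_true]
      obtain ⟨i, hmem, hp⟩ := List.any_eq_true.mp h2
      rw [PySem.List.mem_pyRange_iff_of_pos two_pos] at hmem
      symm
      refine List.all_eq_false.mpr ⟨i, ?_, ?_⟩
      · rw [PySem.List.mem_pyRange_one]; omega
      · have ho : PySem.Int.mod i 2 = 1 := mod_two_of_odd (by omega)
        simp only [ho]
        simp only [beq_iff_eq] at hp ⊢
        omega
    · -- both loops pass: every index satisfies B's check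
      simp only [h1, h2, if_false, Bool.false_eq_true]
      symm
      refine List.all_eq_true.mpr ?_
      intro i hi
      rw [PySem.List.mem_pyRange_one] at hi
      rcases Int.even_or_odd i with ⟨k, hk⟩ | ⟨k, hk⟩
      · have he : PySem.Int.mod i 2 = 0 := mod_two_of_even ⟨k, by omega⟩
        have hall : ¬ ((PySem.List.pyRange 0 m 2).any
            (fun j => PySem.Int.mod (pvDigit s j) 2 != 0) = true) := h1
        rw [List.any_eq_true] at hall
        push Not at hall
        have hmem : i ∈ PySem.List.pyRange 0 m 2 := by
          rw [PySem.List.mem_pyRange_iff_of_pos two_pos]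
          exact ⟨by omega, by omega, ⟨k, by omega⟩⟩
        have hni := hall i hmem
        simp only [he]
        simpa using hni
      · have ho : PySem.Int.mod i 2 = 1 := mod_two_of_odd ⟨k, by omega⟩
        have hall : ¬ ((PySem.List.pyRange 1 m 2).any
            (fun j => PySem.Int.mod (pvDigit s j) 2 == 0) = true) := h2
        rw [List.any_eq_true] at hall
        push Not at hall
        have hmem : i ∈ PySem.List.pyRange 1 m 2 := by
          rw [PySem.List.mem_pyRange_iff_of_pos two_pos]
          exact ⟨by omega, by omega, ⟨k, by omega⟩⟩
        have hni' : ¬ (PySem.Int.mod (pvDigit s i) 2 = 0) := by simpa using hall i hmem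
        have h01 := PySem.Int.mod_two_eq (pvDigit s i)
        simp only [ho, beq_iff_eq]
        omega

theorem vitri_eq_alt (n : Int) : vitri n = vitri_alt n := by
  simp only [vitri, vitri_alt, vitriAltLoop_eq_all]
  exact vitri_key _ _

-- ===== VERDICT (by name: the statement is the Claim_ definition above) =====
theorem vitri_spec : Claim_equal_vitri := by
  intro n _ _
  exact vitri_eq_alt n
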